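-- pv_equiv track=rewrite | github.com/splitCoding/new-langgraph-project | src/util/html_preprocessor.py | _remove_empty_paragraphs
-- ===== SOURCE A (Python) =====
-- def _remove_empty_paragraphs(text: str) -> str:
--     """Remove empty paragraphs and lines."""
--     lines = text.split('\n')
--     non_empty_lines = []
--
--     for line in lines:
--         if line.strip():
--             non_empty_lines.append(line)
--         elif non_empty_lines and non_empty_lines[-1] != '':
--             non_empty_lines.append('')
--
--     # Remove trailing empty line
--     if non_empty_lines and non_empty_lines[-1] == '':
--         non_empty_lines.pop()
--
--     return '\n'.join(non_empty_lines)
-- ===== SOURCE B (Python) =====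
-- def _remove_empty_paragraphs(text: str) -> str:
--     """Remove empty paragraphs and lines."""
--     paragraphs = []
--     in_paragraph = False
--     for line in text.split('\n'):
--         if line.strip():
--             if in_paragraph:
--                 paragraphs[-1].append(line)
--             else:
--                 paragraphs.append([line])
--             in_paragraph = True
--         else:
--             in_paragraph = False
--     return '\n\n'.join('\n'.join(p) for p in paragraphs)
-- ===== Notes on version B (the rewrite author's own statement) =====
-- stated objective: alternative
-- what changed: A builds one flat line list with sentinel empty-string separators (guarded append plus a final pop of a trailing sentinel); B instead groups the non-blank lines into paragraph runs (a nested list plus an in_paragraph flag) and joins with a single newline inside a run and a blank line between runs, so no sentinel or pop exists.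
import Mathlib
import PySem

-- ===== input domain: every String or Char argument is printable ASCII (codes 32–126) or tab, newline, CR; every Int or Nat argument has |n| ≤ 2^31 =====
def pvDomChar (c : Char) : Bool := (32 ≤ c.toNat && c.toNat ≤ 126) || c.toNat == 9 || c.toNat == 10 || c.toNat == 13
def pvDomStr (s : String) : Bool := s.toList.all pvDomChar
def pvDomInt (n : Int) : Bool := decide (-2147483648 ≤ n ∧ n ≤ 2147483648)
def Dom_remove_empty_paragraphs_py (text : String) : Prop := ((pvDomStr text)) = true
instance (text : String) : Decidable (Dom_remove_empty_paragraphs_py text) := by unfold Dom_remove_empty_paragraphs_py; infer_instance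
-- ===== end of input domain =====

-- B replaces A's flat line list with '' sentinels and a final pop by a nested paragraph-run list joined with '\n' inside and '\n\n' between (alternative decomposition, same cost).

-- ===== PORT A =====
-- the loop body of A: append a non-blank line; append a '' separator after a paragraph
def pvStepA (acc : List String) (line : String) : List String :=
  if PySem.Str.strip line ≠ "" then acc ++ [line]
  else if acc ≠ [] ∧ acc.getLast? ≠ some "" then acc ++ [""]
  else acc

def remove_empty_paragraphs_py (text : String) : String :=
  -- text.split('\n'): sep "\n" ≠ "", so split? is always some (getD never fires)
  let lines := (PySem.Str.split? text "\n").getD []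
  let non_empty_lines := lines.foldl pvStepA []
  -- remove trailing empty line
  let non_empty_lines :=
    if non_empty_lines.getLast? = some "" then non_empty_lines.dropLast else non_empty_lines
  PySem.Str.join "\n" non_empty_lines

-- ===== PORT B =====
-- the loop body of B: state = (paragraphs so far, in_paragraph flag)
def pvStepB (s : List (List String) × Bool) (line : String) : List (List String) × Bool :=
  if PySem.Str.strip line ≠ "" then
    (if s.2 then s.1.dropLast ++ [((s.1.getLast?).getD []) ++ [line]] else s.1 ++ [[line]], true)
  else (s.1, false)

def remove_empty_paragraphs_py_alt (text : String) : String :=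
  -- text.split('\n'): sep "\n" ≠ "", so split? is always some (getD never fires)
  let lines := (PySem.Str.split? text "\n").getD []
  let paragraphs := (lines.foldl pvStepB ([], false)).1
  PySem.Str.join "\n\n" (paragraphs.map (fun p => PySem.Str.join "\n" p))

-- ===== PRECONDITION & SPEC =====
def Spec_remove_empty_paragraphs_py (text : String) (out : String) : Prop := out = remove_empty_paragraphs_py_alt text
instance (text : String) (out : String) : Decidable (Spec_remove_empty_paragraphs_py text out) := by unfold Spec_remove_empty_paragraphs_py; infer_instance

-- ===== CLAIM (what is proved, stated in full; the proofs are below) =====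
def Claim_equal_remove_empty_paragraphs_py : Prop := ∀ (text : String), Dom_remove_empty_paragraphs_py text → Spec_remove_empty_paragraphs_py text (remove_empty_paragraphs_py text)

-- ===== LEMMAS AND PROOFS =====

-- the flat line list (with '' separators) that a paragraph-run list denotes
def pvFlat : List (List String) → List String
  | [] => []
  | [g] => g
  | g :: gs => g ++ "" :: pvFlat gs

-- the group conditions B's loop maintains
def pvGood (out : List (List String)) : Prop :=
  ∀ g ∈ out, g ≠ [] ∧ ∀ l ∈ g, PySem.Str.strip l ≠ ""

theorem pvFlat_cons (g : List String) (gs : List (List String)) (h : gs ≠ []) :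
    pvFlat (g :: gs) = g ++ "" :: pvFlat gs := by
  cases gs with
  | nil => exact absurd rfl h
  | cons a t => rfl

theorem pvFlat_snoc (out : List (List String)) (g : List String) (h : out ≠ []) :
    pvFlat (out ++ [g]) = pvFlat out ++ "" :: g := by
  induction out with
  | nil => exact absurd rfl h
  | cons a t ih =>
    cases t with
    | nil => rfl
    | cons b t' =>
      rw [List.cons_append, pvFlat_cons a ((b :: t') ++ [g]) (by simp), ih (by simp),
        pvFlat_cons a (b :: t') (by simp)]
      simp

theorem pvFlat_extend (out : List (List String)) (l : String) (h : out ≠ []) :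
    pvFlat (out.dropLast ++ [(out.getLast?).getD [] ++ [l]]) = pvFlat out ++ [l] := by
  induction out with
  | nil => exact absurd rfl h
  | cons a t ih =>
    cases t with
    | nil => rfl
    | cons b t' =>
      have ht : (b :: t') ≠ [] := by simp
      have h1 : (b :: t').dropLast ++ [((b :: t').getLast?).getD [] ++ [l]] ≠ [] := by simp
      simp only [List.dropLast_cons₂, List.getLast?_cons_cons, List.cons_append,
        pvFlat_cons _ _ h1, pvFlat_cons _ (b :: t') ht]
      rw [show (b :: t').dropLast ++ ((b :: t').getLast?.getD [] ++ [l]) :: []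
            = (b :: t').dropLast ++ [((b :: t').getLast?).getD [] ++ [l]] from rfl, ih ht]
      simp

theorem pvFlat_ne_nil (out : List (List String)) (h : out ≠ []) (hg : pvGood out) :
    pvFlat out ≠ [] := by
  cases out with
  | nil => exact absurd rfl h
  | cons a t =>
    have ha : a ≠ [] := (hg a (by simp)).1
    cases t with
    | nil => simpa [pvFlat] using ha
    | cons b t' => simp [pvFlat_cons a (b :: t') (by simp)]

theorem pv_strip_ne_empty {l : String} (h : PySem.Str.strip l ≠ "") : l ≠ "" := by
  intro he; subst he; exact h (by decide)

theorem pvFlat_getLast (out : List (List String)) (h : out ≠ []) (hg : pvGood out) :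
    ∃ x, (pvFlat out).getLast? = some x ∧ x ≠ "" := by
  induction out with
  | nil => exact absurd rfl h
  | cons a t ih =>
    cases t with
    | nil =>
      have ha : a ≠ [] := (hg a (by simp)).1
      obtain ⟨x, hx⟩ := List.getLast?_isSome.mpr ha |> Option.isSome_iff_exists.mp
      refine ⟨x, by simpa only [pvFlat] using hx, ?_⟩
      have hmem : x ∈ a := List.mem_of_getLast? hx
      exact pv_strip_ne_empty ((hg a (by simp)).2 x hmem)
    | cons b t' =>
      have hg' : pvGood (b :: t') := fun g hgm => hg g (by simp [hgm])
      obtain ⟨x, hx, hxe⟩ := ih (by simp) hg'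
      have hne : pvFlat (b :: t') ≠ [] := pvFlat_ne_nil _ (by simp) hg'
      refine ⟨x, ?_, hxe⟩
      rw [pvFlat_cons a (b :: t') (by simp), List.getLast?_append_of_ne_nil _ (by simp),
        show ("" :: pvFlat (b :: t')) = [""] ++ pvFlat (b :: t') from rfl,
        List.getLast?_append_of_ne_nil _ hne]
      exact hx

-- the '' marker A's flat list carries after a blank line ends a paragraph
def pvMark (out : List (List String)) (prev : Bool) : List String :=
  if prev = false ∧ out ≠ [] then [""] else []

-- loop invariant: A's accumulator is the flattening of B's state (plus the marker)
theorem pv_loop (ls : List String) :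
    ∀ (out : List (List String)) (prev : Bool),
    (prev = true → out ≠ []) → pvGood out →
    List.foldl pvStepA (pvFlat out ++ pvMark out prev) ls
        = pvFlat (List.foldl pvStepB (out, prev) ls).1
            ++ pvMark (List.foldl pvStepB (out, prev) ls).1 (List.foldl pvStepB (out, prev) ls).2
      ∧ ((List.foldl pvStepB (out, prev) ls).2 = true → (List.foldl pvStepB (out, prev) ls).1 ≠ [])
      ∧ pvGood (List.foldl pvStepB (out, prev) ls).1 := by
  induction ls with
  | nil => intro out prev h1 h2; exact ⟨rfl, h1, h2⟩
  | cons line rest ih =>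
    intro out prev h1 h2
    by_cases hs : PySem.Str.strip line ≠ ""
    · -- non-blank line
      cases prev with
      | true =>
        have hne : out ≠ [] := h1 rfl
        have hstepB : pvStepB (out, true) line
            = (out.dropLast ++ [(out.getLast?).getD [] ++ [line]], true) := by
          simp [pvStepB, hs]
        have hstepA : pvStepA (pvFlat out ++ pvMark out true) line
            = pvFlat out ++ [line] := by
          simp [pvStepA, hs, pvMark]
        have hgood : pvGood (out.dropLast ++ [(out.getLast?).getD [] ++ [line]]) := by
          intro g hgm
          rcases List.mem_append.mp hgm with hd | hl
          · exact h2 g (List.dropLast_subset _ hd)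
          · have : g = (out.getLast?).getD [] ++ [line] := by simpa using hl
            subst this
            constructor
            · simp
            · intro l hlm
              rcases List.mem_append.mp hlm with hL | hR
              · have hlast : (out.getLast?).getD [] ∈ out := by
                  obtain ⟨x, hx⟩ := List.getLast?_isSome.mpr hne |> Option.isSome_iff_exists.mp
                  rw [hx]; simpa using List.mem_of_getLast? hx
                exact (h2 _ hlast).2 l hL
              · have : l = line := by simpa using hR
                subst this; exact hs
        have := ih (out.dropLast ++ [(out.getLast?).getD [] ++ [line]]) true
          (fun _ => by simp) hgood
        simp only [List.foldl_cons, hstepB, hstepA]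
        rw [show pvFlat out ++ [line]
              = pvFlat (out.dropLast ++ [(out.getLast?).getD [] ++ [line]])
                ++ pvMark (out.dropLast ++ [(out.getLast?).getD [] ++ [line]]) true by
            rw [pvFlat_extend out line hne]; simp [pvMark]]
        exact this
      | false =>
        have hstepB : pvStepB (out, false) line = (out ++ [[line]], true) := by
          simp [pvStepB, hs]
        have hstepA : pvStepA (pvFlat out ++ pvMark out false) line
            = pvFlat out ++ pvMark out false ++ [line] := by
          simp [pvStepA, hs]
        have hgood : pvGood (out ++ [[line]]) := by
          intro g hgm
          rcases List.mem_append.mp hgm with hd | hl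
          · exact h2 g hd
          · have : g = [line] := by simpa using hl
            subst this
            exact ⟨by simp, by intro l hlm; rw [List.mem_singleton.mp hlm]; exact hs⟩
        have heq : pvFlat out ++ pvMark out false ++ [line]
            = pvFlat (out ++ [[line]]) ++ pvMark (out ++ [[line]]) true := by
          by_cases ho : out = []
          · subst ho; simp [pvMark, pvFlat]
          · rw [pvFlat_snoc out [line] ho]; simp [pvMark, ho]
        have := ih (out ++ [[line]]) true (fun _ => by simp) hgood
        simp only [List.foldl_cons, hstepB, hstepA]
        rw [heq]; exact this
    · -- blank line
      have hstepB : pvStepB (out, prev) line = (out, false) := by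
        simp [pvStepB, hs]
      have hs' : PySem.Str.strip line = "" := not_not.mp (by simpa using hs)
      have hstepA : pvStepA (pvFlat out ++ pvMark out prev) line
          = pvFlat out ++ pvMark out false := by
        cases prev with
        | true =>
          have hne : out ≠ [] := h1 rfl
          obtain ⟨x, hx, hxe⟩ := pvFlat_getLast out hne h2
          have hfl : pvFlat out ≠ [] := pvFlat_ne_nil out hne h2
          have hmark : pvMark out true = [] := by simp [pvMark]
          have hmark' : pvMark out false = [""] := by simp [pvMark, hne]
          rw [hmark, hmark', List.append_nil]
          simp only [pvStepA]
          rw [if_neg (by simp [hs']), if_pos ⟨hfl, by simp [hx, hxe]⟩]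
        | false =>
          by_cases ho : out = []
          · subst ho
            simp [pvStepA, hs', pvMark, pvFlat]
          · have hmark' : pvMark out false = [""] := by simp [pvMark, ho]
            rw [hmark']
            simp only [pvStepA]
            rw [if_neg (by simp [hs']), if_neg (by simp)]
      have := ih out false (by simp) h2
      simp only [List.foldl_cons, hstepB, hstepA]
      exact this

-- joining helpers, at the List Char level
theorem pv_join_append (sep : List Char) (xs ys : List (List Char))
    (hx : xs ≠ []) (hy : ys ≠ []) :
    PySem.Chars.join sep (xs ++ ys) = PySem.Chars.join sep xs ++ sep ++ PySem.Chars.join sep ys := by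
  induction xs with
  | nil => exact absurd rfl hx
  | cons x xs' ih =>
    cases xs' with
    | nil =>
      cases ys with
      | nil => exact absurd rfl hy
      | cons y ys' => simpa using PySem.Chars.join_cons_cons sep x y ys'
    | cons x' xs'' =>
      have h1 : (x' :: xs'') ++ ys ≠ [] := by simp
      obtain ⟨z, zs, hz⟩ := List.exists_cons_of_ne_nil h1
      calc PySem.Chars.join sep ((x :: x' :: xs'') ++ ys)
          = x ++ sep ++ PySem.Chars.join sep ((x' :: xs'') ++ ys) := by
            rw [List.cons_append, hz]
            rw [PySem.Chars.join_cons_cons, ← hz]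
        _ = x ++ sep ++ (PySem.Chars.join sep (x' :: xs'') ++ sep ++ PySem.Chars.join sep ys) := by
            rw [ih (by simp)]
        _ = PySem.Chars.join sep (x :: x' :: xs'') ++ sep ++ PySem.Chars.join sep ys := by
            rw [PySem.Chars.join_cons_cons]; simp

-- pvFlat on lists of code points, and the bridge from pvFlat on strings
def pvFlatC : List (List (List Char)) → List (List Char)
  | [] => []
  | [g] => g
  | g :: gs => g ++ [] :: pvFlatC gs

theorem pvFlatC_cons (g : List (List Char)) (gs : List (List (List Char))) (h : gs ≠ []) :
    pvFlatC (g :: gs) = g ++ [] :: pvFlatC gs := by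
  cases gs with
  | nil => exact absurd rfl h
  | cons a t => rfl

theorem pvFlat_map_toList (out : List (List String)) :
    (pvFlat out).map String.toList = pvFlatC (out.map (List.map String.toList)) := by
  induction out with
  | nil => rfl
  | cons a t ih =>
    cases t with
    | nil => simp [pvFlat, pvFlatC]
    | cons b t' =>
      rw [pvFlat_cons a (b :: t') (by simp), List.map_cons,
        pvFlatC_cons _ _ (by simp), List.map_append, List.map_cons, ih]
      rfl

theorem pvFlatC_ne_nil (g : List (List Char)) (gs : List (List (List Char))) (h : g ≠ []) :
    pvFlatC (g :: gs) ≠ [] := by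
  cases gs with
  | nil => simpa [pvFlatC] using h
  | cons b t => rw [pvFlatC_cons _ _ (by simp)]; simp [h]

theorem pv_joinC (sep : List Char) (ps : List (List (List Char))) (h : ∀ g ∈ ps, g ≠ []) :
    PySem.Chars.join sep (pvFlatC ps)
      = PySem.Chars.join (sep ++ sep) (ps.map (PySem.Chars.join sep)) := by
  induction ps with
  | nil => simp [pvFlatC, PySem.Chars.join_nil]
  | cons g t ih =>
    cases t with
    | nil => simp [pvFlatC, PySem.Chars.join_singleton]
    | cons b t' =>
      have hb : b ≠ [] := h b (by simp)
      have hg : g ≠ [] := h g (by simp)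
      have hfl : pvFlatC (b :: t') ≠ [] := pvFlatC_ne_nil b t' hb
      obtain ⟨z, zs, hz⟩ := List.exists_cons_of_ne_nil hfl
      rw [pvFlatC_cons g (b :: t') (by simp),
        pv_join_append sep g ([] :: pvFlatC (b :: t')) hg (by simp), hz,
        PySem.Chars.join_cons_cons, ← hz, ih (fun g' hg' => h g' (by simp [hg']))]
      simp only [List.map_cons, PySem.Chars.join_cons_cons]
      simp

theorem pv_join_eq (out : List (List String)) (hg : pvGood out) :
    PySem.Str.join "\n" (pvFlat out)
      = PySem.Str.join "\n\n" (out.map (fun p => PySem.Str.join "\n" p)) := by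
  have hne : ∀ g ∈ out.map (List.map String.toList), g ≠ [] := by
    intro g hgm
    obtain ⟨p, hp, rfl⟩ := List.mem_map.mp hgm
    simpa using (hg p hp).1
  apply String.toList_inj.mp
  simp only [PySem.Str.join, String.toList_ofList]
  rw [pvFlat_map_toList]
  have := pv_joinC "\n".toList (out.map (List.map String.toList)) hne
  rw [show ("\n".toList ++ "\n".toList) = "\n\n".toList from rfl] at this
  rw [this, List.map_map, List.map_map]
  simp [Function.comp_def, String.toList_ofList]

-- ===== VERDICT (by name: the statement is the Claim_ definition above) =====
theorem remove_empty_paragraphs_py_spec : Claim_equal_remove_empty_paragraphs_py := by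
  intro text _
  unfold Spec_remove_empty_paragraphs_py
  simp only [remove_empty_paragraphs_py, remove_empty_paragraphs_py_alt]
  set lines := (PySem.Str.split? text "\n").getD [] with hlines
  obtain ⟨hmain, hprev, hgood⟩ := pv_loop lines [] false (by simp) (by intro g hgm; simp at hgm)
  have hstart : pvFlat [] ++ pvMark [] false = ([] : List String) := by simp [pvFlat, pvMark]
  rw [hstart] at hmain
  set s := List.foldl pvStepB ([], false) lines with hsdef
  rw [hmain]
  by_cases ho : s.1 = []
  · -- no paragraph at all: both sides are the empty string
    rw [ho]
    simp [pvFlat, pvMark, PySem.Str.join, PySem.Chars.join_nil]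
  · obtain ⟨x, hx, hxe⟩ := pvFlat_getLast s.1 ho hgood
    cases hp : s.2 with
    | true =>
      rw [show pvMark s.1 true = [] by simp [pvMark], List.append_nil,
        if_neg (by simp [hx, hxe])]
      exact pv_join_eq s.1 hgood
    | false =>
      rw [show pvMark s.1 false = [""] by simp [pvMark, ho],
        if_pos List.getLast?_concat, List.dropLast_concat]
      exact pv_join_eq s.1 hgood
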